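-- pv_equiv track=rewrite | github.com/soolabettu/euler | 95.py | solve
-- ===== SOURCE A (Python) =====
-- def solve(limit):
--     """Find the longest amicable chain with members below limit."""
--     a = [1] * limit
--     for i in range(2, limit):
--         for j in range(2 * i, limit, i):
--             a[j] += i
--
--     max_chain = []
--     for i in range(1, limit):
--         num = i
--         seen = []
--         while num < limit:
--             if num in seen:
--                 if num == i:
--                     if len(seen) > len(max_chain):
--                         max_chain = seen
--                 break
--
--             seen.append(num)
--             num = a[num]
--
--     return max_chain
-- ===== SOURCE B (Python) =====
-- def solve(limit):
--     a = [1] * limit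
--     for i in range(2, limit):
--         for j in range(2 * i, limit, i):
--             a[j] += i
--     best = []
--     for i in range(1, limit):
--         chain = [i]
--         num = a[i]
--         check = i      # Brent-style checkpoint: catches walks stuck in a cycle not through i
--         length = 1
--         power = 1
--         steps = limit
--         while steps > 0 and i < num < limit and num != check:
--             if length == power:
--                 check = num
--                 power *= 2
--                 length = 0
--             chain.append(num)
--             num = a[num]
--             length += 1
--             steps -= 1
--         if num == i and len(chain) > len(best):
--             best = chain
--     return best
-- ===== Notes on version B (the rewrite author's own statement) =====
-- stated objective: faster
-- what changed: The inner cycle search keeps no 'seen' list to scan: it walks the aliquot chain with O(1) state, stopping when the value returns to i, drops to or below a smaller start (such a cycle was already accounted for at its minimal element), leaves the limit, or revisits a Brent-style doubling checkpoint (the walk is stuck in a cycle not through i), so the quadratic per-chain membership scans disappear; intended as faster, a timing run measured 1.86x at the largest size both finished.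
import Mathlib
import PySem

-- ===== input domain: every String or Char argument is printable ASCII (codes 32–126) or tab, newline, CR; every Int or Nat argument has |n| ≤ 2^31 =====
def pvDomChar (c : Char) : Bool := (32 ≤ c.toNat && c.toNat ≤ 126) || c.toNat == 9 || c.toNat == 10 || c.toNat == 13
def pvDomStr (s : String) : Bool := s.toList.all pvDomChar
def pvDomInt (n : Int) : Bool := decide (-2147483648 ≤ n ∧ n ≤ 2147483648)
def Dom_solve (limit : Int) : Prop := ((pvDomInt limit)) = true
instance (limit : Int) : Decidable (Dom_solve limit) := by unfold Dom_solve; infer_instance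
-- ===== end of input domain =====

-- B replaces A's per-step membership scan of the 'seen' list by an O(1)-state walk that
-- stops once the value returns to i, drops to/below a smaller start (that cycle was
-- already counted at its minimal element), or revisits a Brent-style checkpoint
-- (a foreign cycle); intended as faster (timing run measured 1.86x at the largest
-- size both versions finished), same return value.

-- ===== PORT A =====
-- shared sieve: a = [1]*limit; for i in range(2, limit): for j in range(2*i, limit, i): a[j] += i
-- (B's Python contains the textually identical sieve, so both ports use this helper)
def pySieve (limit : Int) : Array Int :=
  (PySem.List.pyRange 2 limit 1).foldl
    (fun a i =>
      (PySem.List.pyRange (2 * i) limit i).foldl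
        (fun a j => a.setIfInBounds j.toNat (a.getD j.toNat 0 + i)) a)
    (Array.replicate limit.toNat 1)

-- A's inner 'while num < limit' loop; fuel = limit.toNat + 1 never runs out, because the
-- loop appends pairwise-distinct values of [1, limit) to seen (at most limit iterations).
-- a[num]: at every reachable state 1 ≤ num < limit = len(a) (sieve entries are ≥ 1),
-- so pyGetD with default 0 is exact.
def solveLoopA (a : Array Int) (limit i : Int) : Nat → Int → List Int → List Int → List Int
  | 0, _, _, mc => mc
  | fuel + 1, num, seen, mc =>
    if num < limit then
      if num ∈ seen then
        if num = i then (if seen.length > mc.length then seen else mc) else mc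
      else solveLoopA a limit i fuel (a.getD num.toNat 0) (seen ++ [num]) mc
    else mc

def solveStepA (a : Array Int) (limit : Int) (mc : List Int) (i : Int) : List Int :=
  solveLoopA a limit i (limit.toNat + 1) i [] mc

def solve (limit : Int) : List Int :=
  let a := pySieve limit
  (PySem.List.pyRange 1 limit 1).foldl (solveStepA a limit) []

-- ===== PORT B =====
-- B's inner loop: 'while steps > 0 and i < num < limit and num != check: …';
-- the Nat fuel is B's own 'steps' counter (steps = limit at entry); state
-- (num, chain, check, length, power) as in Source B, branches in the same order.
def solveLoopB (a : Array Int) (limit i : Int) :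
    Nat → Int → List Int → Int → Int → Int → Int × List Int
  | 0, num, chain, _, _, _ => (num, chain)
  | steps + 1, num, chain, check, length, power =>
    if i < num ∧ num < limit ∧ num ≠ check then
      if length = power then
        solveLoopB a limit i steps (a.getD num.toNat 0) (chain ++ [num]) num 1 (power * 2)
      else
        solveLoopB a limit i steps (a.getD num.toNat 0) (chain ++ [num]) check (length + 1) power
    else (num, chain)

def solveStepB (a : Array Int) (limit : Int) (best : List Int) (i : Int) : List Int :=
  let r := solveLoopB a limit i limit.toNat (a.getD i.toNat 0) [i] i 1 1
  if r.1 = i ∧ r.2.length > best.length then r.2 else best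

def solve_alt (limit : Int) : List Int :=
  let a := pySieve limit
  (PySem.List.pyRange 1 limit 1).foldl (solveStepB a limit) []

-- ===== PRECONDITION & SPEC =====
def Spec_solve (limit : Int) (out : List Int) : Prop := out = solve_alt limit
instance (limit : Int) (out : List Int) : Decidable (Spec_solve limit out) := by unfold Spec_solve; infer_instance

-- ===== CLAIM (what is proved, stated in full; the proofs are below) =====
def Claim_equal_solve : Prop := ∀ (limit : Int), Dom_solve limit → Spec_solve limit (solve limit)

-- ===== LEMMAS AND PROOFS =====

-- the step function of the aliquot walk, and its orbit
def pvF (limit : Int) : Int → Int := fun n => (pySieve limit).getD n.toNat 0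
def pvOrb (limit i : Int) (t : Nat) : Int := (pvF limit)^[t] i

-- generic foldl invariant
theorem pv_foldl_inv {α β : Type} (P : α → Prop) (l : List β) (f : α → β → α) (init : α)
    (h0 : P init) (hstep : ∀ acc b, b ∈ l → P acc → P (f acc b)) : P (l.foldl f init) := by
  induction l generalizing init with
  | nil => exact h0
  | cons b l ih =>
    exact ih (f init b) (hstep init b (List.mem_cons_self) h0)
      (fun acc c hc hacc => hstep acc c (List.mem_cons_of_mem _ hc) hacc)

theorem pv_getD_set (a : Array Int) (j k : Nat) (v : Int) (hk : k < a.size) :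
    (a.setIfInBounds j v).getD k 0 = if j = k then v else a.getD k 0 := by
  simp [Array.getD, hk, Array.getElem_setIfInBounds]

theorem pvSieve_inv (limit : Int) :
    (pySieve limit).size = limit.toNat ∧
      ∀ k : Nat, k < (pySieve limit).size → 1 ≤ (pySieve limit).getD k 0 := by
  unfold pySieve
  refine pv_foldl_inv (P := fun (a : Array Int) => a.size = limit.toNat ∧
      ∀ k : Nat, k < a.size → 1 ≤ a.getD k 0) _ _ _ ⟨by simp, ?_⟩ ?_
  · intro k hk
    simp only [Array.size_replicate] at hk
    simp [Array.getD, hk]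
  · intro acc i hi hacc
    have hi2 : 2 ≤ i := (PySem.List.mem_pyRange_one.mp hi).1
    refine pv_foldl_inv (P := fun (a : Array Int) => a.size = limit.toNat ∧
        ∀ k : Nat, k < a.size → 1 ≤ a.getD k 0) _ _ _ hacc ?_
    intro a j hj ha
    obtain ⟨hja, hjl, -⟩ := (PySem.List.mem_pyRange_iff_of_pos (by omega) j).mp hj
    refine ⟨by rw [Array.size_setIfInBounds]; exact ha.1, ?_⟩
    intro k hk
    rw [Array.size_setIfInBounds] at hk
    rw [pv_getD_set a j.toNat k _ hk]
    split
    · have hjsz : j.toNat < a.size := by omega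
      have := ha.2 j.toNat hjsz
      omega
    · have := ha.2 k hk
      simpa [Array.getD, hk] using this

theorem pvF_pos (limit n : Int) (h0 : 1 ≤ n) (h1 : n < limit) : 1 ≤ pvF limit n := by
  obtain ⟨hsz, hpos⟩ := pvSieve_inv limit
  exact hpos n.toNat (by omega)

theorem pvOrb_succ (limit i : Int) (t : Nat) :
    pvOrb limit i (t + 1) = pvF limit (pvOrb limit i t) := Function.iterate_succ_apply' _ _ _

theorem pvOrb_zero (limit i : Int) : pvOrb limit i 0 = i := rfl

theorem pvOrb_pos (limit i : Int) (hi : 1 ≤ i) (_hlt : i < limit) (t : Nat)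
    (h : ∀ u < t, pvOrb limit i u < limit) : 1 ≤ pvOrb limit i t := by
  induction t with
  | zero => simpa [pvOrb_zero] using hi
  | succ t ih =>
    rw [pvOrb_succ]
    exact pvF_pos _ _ (ih (fun u hu => h u (by omega))) (h t (by omega))

-- pigeonhole: the walk exits or repeats within limit.toNat steps
theorem pv_exists_stop (limit i : Int) (hi : 1 ≤ i) (hlt : i < limit) :
    ∃ t, t ≤ limit.toNat ∧
      (limit ≤ pvOrb limit i t ∨ pvOrb limit i t ∈ (List.range t).map (pvOrb limit i)) := by
  by_contra hc
  have hc' : ∀ t ≤ limit.toNat, pvOrb limit i t < limit ∧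
      pvOrb limit i t ∉ (List.range t).map (pvOrb limit i) := by
    intro t ht
    rcases not_or.mp (fun hd => hc ⟨t, ht, hd⟩) with ⟨h1, h2⟩
    exact ⟨by omega, h2⟩
  have hmaps : Set.MapsTo (fun t => (pvOrb limit i t).toNat)
      ↑(Finset.range (limit.toNat + 1)) ↑(Finset.range limit.toNat) := by
    intro t ht
    simp only [Finset.coe_range, Set.mem_Iio] at ht ⊢
    have hlt' := (hc' t (by omega)).1
    have hpos : 1 ≤ pvOrb limit i t :=
      pvOrb_pos limit i hi hlt t (fun u hu => (hc' u (by omega)).1)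
    omega
  obtain ⟨x, hx, y, hy, hne, heq⟩ :=
    Finset.exists_ne_map_eq_of_card_lt_of_maps_to (by simp) hmaps
  simp only [Finset.mem_range] at hx hy
  have hxpos : 1 ≤ pvOrb limit i x :=
    pvOrb_pos limit i hi hlt x (fun u hu => (hc' u (by omega)).1)
  have hypos : 1 ≤ pvOrb limit i y :=
    pvOrb_pos limit i hi hlt y (fun u hu => (hc' u (by omega)).1)
  have hval : pvOrb limit i x = pvOrb limit i y := by omega
  rcases Nat.lt_or_ge x y with hxy | hxy
  · exact (hc' y (by omega)).2 (List.mem_map.mpr ⟨x, List.mem_range.mpr hxy, hval⟩)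
  · have hyx : y < x := by omega
    exact (hc' x (by omega)).2 (List.mem_map.mpr ⟨y, List.mem_range.mpr hyx, hval.symm⟩)

-- characterization of A's inner loop in terms of the first exit-or-repeat index ρ
theorem pvLoopA_run (limit i : Int) (ρ : Nat)
    (hρ1 : limit ≤ pvOrb limit i ρ ∨ pvOrb limit i ρ ∈ (List.range ρ).map (pvOrb limit i))
    (hρ2 : ∀ t < ρ, pvOrb limit i t < limit ∧ pvOrb limit i t ∉ (List.range t).map (pvOrb limit i)) :
    ∀ fuel t (mc : List Int), t ≤ ρ → ρ < fuel + t →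
      solveLoopA (pySieve limit) limit i fuel (pvOrb limit i t)
          ((List.range t).map (pvOrb limit i)) mc =
        if pvOrb limit i ρ < limit ∧ pvOrb limit i ρ = i ∧ ρ > mc.length
        then (List.range ρ).map (pvOrb limit i) else mc := by
  intro fuel
  induction fuel with
  | zero => intro t mc ht hf; omega
  | succ fuel ih =>
    intro t mc ht hf
    rcases Nat.lt_or_ge t ρ with htρ | htρ
    · obtain ⟨h1, h2⟩ := hρ2 t htρ
      rw [solveLoopA, if_pos h1, if_neg h2]
      have hstep : (pySieve limit).getD (pvOrb limit i t).toNat 0 = pvOrb limit i (t + 1) :=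
        (pvOrb_succ limit i t).symm
      have hseen : (List.range t).map (pvOrb limit i) ++ [pvOrb limit i t] =
          (List.range (t + 1)).map (pvOrb limit i) := by
        rw [List.range_succ, List.map_append, List.map_singleton]
      rw [hstep, hseen]
      exact ih (t + 1) mc (by omega) (by omega)
    · have hteq : t = ρ := le_antisymm ht htρ
      subst hteq
      rw [solveLoopA]
      by_cases hL : pvOrb limit i t < limit
      · have hmem : pvOrb limit i t ∈ (List.range t).map (pvOrb limit i) := by
          rcases hρ1 with h | h
          · omega
          · exact h
        rw [if_pos hL, if_pos hmem]
        by_cases hI : pvOrb limit i t = i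
        · rw [if_pos hI]
          simp only [List.length_map, List.length_range]
          by_cases hlen : t > mc.length
          · rw [if_pos hlen, if_pos ⟨hL, hI, hlen⟩]
          · rw [if_neg hlen, if_neg (by tauto)]
        · rw [if_neg hI, if_neg (by tauto)]
      · rw [if_neg hL, if_neg (by tauto)]

-- characterization of B's inner loop when it runs to its stopping index T
-- (hNoRep says the walk does not repeat a value before T, so the Brent
-- checkpoint test 'num != check' never fires early)
theorem pvLoopB_run (limit i : Int) (T : Nat)
    (hT1 : pvOrb limit i T ≤ i ∨ limit ≤ pvOrb limit i T)
    (hT2 : ∀ u, 0 < u → u < T → i < pvOrb limit i u ∧ pvOrb limit i u < limit)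
    (hNoRep : ∀ c u : Nat, c < u → u < T → pvOrb limit i u ≠ pvOrb limit i c) :
    ∀ fuel t check length power, 1 ≤ t → t ≤ T → T ≤ fuel + t →
      (∃ c : Nat, c < t ∧ check = pvOrb limit i c) →
      solveLoopB (pySieve limit) limit i fuel (pvOrb limit i t)
          ((List.range t).map (pvOrb limit i)) check length power =
        (pvOrb limit i T, (List.range T).map (pvOrb limit i)) := by
  intro fuel
  induction fuel with
  | zero =>
    intro t check length power ht1 ht2 hf hc
    have heq : t = T := by omega
    subst heq
    rfl
  | succ fuel ih =>
    intro t check length power ht1 ht2 hf hc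
    rcases Nat.lt_or_ge t T with htT | htT
    · obtain ⟨ha, hb⟩ := hT2 t (by omega) htT
      obtain ⟨c, hct, hcv⟩ := hc
      have hne : pvOrb limit i t ≠ check := by
        rw [hcv]
        exact hNoRep c t hct htT
      rw [solveLoopB, if_pos ⟨ha, hb, hne⟩]
      have hstep : (pySieve limit).getD (pvOrb limit i t).toNat 0 = pvOrb limit i (t + 1) :=
        (pvOrb_succ limit i t).symm
      have hseen : (List.range t).map (pvOrb limit i) ++ [pvOrb limit i t] =
          (List.range (t + 1)).map (pvOrb limit i) := by
        rw [List.range_succ, List.map_append, List.map_singleton]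
      split
      · rw [hstep, hseen]
        exact ih (t + 1) _ _ _ (by omega) (by omega) (by omega) ⟨t, by omega, rfl⟩
      · rw [hstep, hseen]
        exact ih (t + 1) _ _ _ (by omega) (by omega) (by omega) ⟨c, by omega, hcv⟩
    · have hteq : t = T := le_antisymm ht2 htT
      subst hteq
      rw [solveLoopB, if_neg (by rcases hT1 with h | h <;> simp <;> omega)]

-- B's final num is always an orbit point
theorem pvLoopB_fst (limit i : Int) :
    ∀ fuel t chain check length power, ∃ T, t ≤ T ∧
      (solveLoopB (pySieve limit) limit i fuel (pvOrb limit i t)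
        chain check length power).1 = pvOrb limit i T := by
  intro fuel
  induction fuel with
  | zero => exact fun t chain check length power => ⟨t, le_rfl, rfl⟩
  | succ fuel ih =>
    intro t chain check length power
    rw [solveLoopB]
    by_cases hcond : i < pvOrb limit i t ∧ pvOrb limit i t < limit ∧ pvOrb limit i t ≠ check
    · rw [if_pos hcond]
      have hstep : (pySieve limit).getD (pvOrb limit i t).toNat 0 = pvOrb limit i (t + 1) :=
        (pvOrb_succ limit i t).symm
      rw [hstep]
      split
      · obtain ⟨T, hT, h⟩ := ih (t + 1) _ _ _ _
        exact ⟨T, by omega, h⟩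
      · obtain ⟨T, hT, h⟩ := ih (t + 1) _ _ _ _
        exact ⟨T, by omega, h⟩
    · exact ⟨t, le_rfl, by rw [if_neg hcond]⟩

-- and if an unconditional stop is known at index U within the fuel, the final
-- index does not pass U
theorem pvLoopB_fst_le (limit i : Int) (U : Nat)
    (hU : pvOrb limit i U ≤ i ∨ limit ≤ pvOrb limit i U) :
    ∀ fuel t chain check length power, t ≤ U → U ≤ fuel + t →
      ∃ T, t ≤ T ∧ T ≤ U ∧
        (solveLoopB (pySieve limit) limit i fuel (pvOrb limit i t)
          chain check length power).1 = pvOrb limit i T := by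
  intro fuel
  induction fuel with
  | zero =>
    intro t chain check length power ht hf
    exact ⟨t, le_rfl, ht, rfl⟩
  | succ fuel ih =>
    intro t chain check length power ht hf
    rcases Nat.lt_or_ge t U with htU | htU
    · rw [solveLoopB]
      by_cases hcond : i < pvOrb limit i t ∧ pvOrb limit i t < limit ∧ pvOrb limit i t ≠ check
      · rw [if_pos hcond]
        have hstep : (pySieve limit).getD (pvOrb limit i t).toNat 0 = pvOrb limit i (t + 1) :=
          (pvOrb_succ limit i t).symm
        rw [hstep]
        split
        · obtain ⟨T, h1, h2, h3⟩ := ih (t + 1) _ _ _ _ (by omega) (by omega)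
          exact ⟨T, by omega, h2, h3⟩
        · obtain ⟨T, h1, h2, h3⟩ := ih (t + 1) _ _ _ _ (by omega) (by omega)
          exact ⟨T, by omega, h2, h3⟩
      · exact ⟨t, le_rfl, by omega, by rw [if_neg hcond]⟩
    · have hteq : t = U := by omega
      subst hteq
      exact ⟨t, le_rfl, le_rfl, by
        rw [solveLoopB, if_neg (by rcases hU with h | h <;> simp <;> omega)]⟩

-- reading solveStepB through the two loop characterizations
theorem pvStepB_run (limit i : Int) (best : List Int) (T : Nat)
    (hB : solveLoopB (pySieve limit) limit i limit.toNat (pvOrb limit i 1)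
        ((List.range 1).map (pvOrb limit i)) (pvOrb limit i 0) 1 1 =
      (pvOrb limit i T, (List.range T).map (pvOrb limit i))) :
    solveStepB (pySieve limit) limit best i =
      (if pvOrb limit i T = i ∧ T > best.length
       then (List.range T).map (pvOrb limit i) else best) := by
  show (if ((solveLoopB (pySieve limit) limit i limit.toNat (pvOrb limit i 1)
      ((List.range 1).map (pvOrb limit i)) (pvOrb limit i 0) 1 1).1 = i ∧
      (solveLoopB (pySieve limit) limit i limit.toNat (pvOrb limit i 1)
      ((List.range 1).map (pvOrb limit i)) (pvOrb limit i 0) 1 1).2.length > best.length)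
    then (solveLoopB (pySieve limit) limit i limit.toNat (pvOrb limit i 1)
      ((List.range 1).map (pvOrb limit i)) (pvOrb limit i 0) 1 1).2 else best) = _
  rw [hB]
  simp only [List.length_map, List.length_range]

theorem pvStepB_ne (limit i : Int) (best : List Int)
    (h : (solveLoopB (pySieve limit) limit i limit.toNat (pvOrb limit i 1)
      [pvOrb limit i 0] (pvOrb limit i 0) 1 1).1 ≠ i) :
    solveStepB (pySieve limit) limit best i = best := by
  show (if ((solveLoopB (pySieve limit) limit i limit.toNat (pvOrb limit i 1)
      [pvOrb limit i 0] (pvOrb limit i 0) 1 1).1 = i ∧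
      (solveLoopB (pySieve limit) limit i limit.toNat (pvOrb limit i 1)
      [pvOrb limit i 0] (pvOrb limit i 0) 1 1).2.length > best.length)
    then (solveLoopB (pySieve limit) limit i limit.toNat (pvOrb limit i 1)
      [pvOrb limit i 0] (pvOrb limit i 0) 1 1).2 else best) = best
  rw [if_neg (fun hcon => h hcon.1)]

-- invariant carried along the outer fold: every cycle fully below limit whose member m is
-- below the bound already fits inside mc
def pvInv (limit bound : Int) (mc : List Int) : Prop :=
  ∀ m : Int, 1 ≤ m → m < bound → m ∈ Function.periodicPts (pvF limit) →
    (∀ u : Nat, (pvF limit)^[u] m < limit) →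
    Function.minimalPeriod (pvF limit) m ≤ mc.length

theorem pv_nat_min {p : Nat → Prop} (h : ∃ n, p n) : ∃ n, p n ∧ ∀ m < n, ¬ p m := by
  classical
  exact ⟨Nat.find h, Nat.find_spec h, fun m hm => Nat.find_min h hm⟩

theorem pv_step_agree (limit i : Int) (hi : 1 ≤ i) (hlt : i < limit) (mc : List Int)
    (hInv : pvInv limit i mc) :
    solveStepA (pySieve limit) limit mc i = solveStepB (pySieve limit) limit mc i ∧
      pvInv limit (i + 1) (solveStepA (pySieve limit) limit mc i) ∧
      mc.length ≤ (solveStepA (pySieve limit) limit mc i).length := by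
  obtain ⟨t0, ht0, hQ0⟩ := pv_exists_stop limit i hi hlt
  obtain ⟨ρ, hρQ, hρmin⟩ := pv_nat_min (p := fun t => limit ≤ pvOrb limit i t ∨
    pvOrb limit i t ∈ (List.range t).map (pvOrb limit i)) ⟨t0, hQ0⟩
  have hρ2 : ∀ t < ρ, pvOrb limit i t < limit ∧
      pvOrb limit i t ∉ (List.range t).map (pvOrb limit i) := by
    intro t ht
    have h := hρmin t ht
    rcases not_or.mp h with ⟨h1, h2⟩
    exact ⟨by omega, h2⟩
  have hρle : ρ ≤ limit.toNat := by
    by_contra h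
    exact hρmin t0 (by omega) hQ0
  have hρpos : 0 < ρ := by
    rcases Nat.eq_zero_or_pos ρ with h | h
    · subst h
      rcases hρQ with h1 | h1
      · rw [pvOrb_zero] at h1; omega
      · simp at h1
    · exact h
  have hA : solveStepA (pySieve limit) limit mc i =
      (if pvOrb limit i ρ < limit ∧ pvOrb limit i ρ = i ∧ ρ > mc.length
       then (List.range ρ).map (pvOrb limit i) else mc) :=
    pvLoopA_run limit i ρ hρQ hρ2 (limit.toNat + 1) 0 mc (by omega) (by omega)
  by_cases hE : limit ≤ pvOrb limit i ρ
  · -- the walk leaves the limit before any repetition: both sides keep mc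
    have hAmc : solveStepA (pySieve limit) limit mc i = mc := by
      rw [hA, if_neg (by omega)]
    obtain ⟨T, hTQ, hTmin⟩ := pv_nat_min
      (p := fun u => 0 < u ∧ (pvOrb limit i u ≤ i ∨ limit ≤ pvOrb limit i u))
      ⟨ρ, hρpos, Or.inr hE⟩
    have hT2 : ∀ u, 0 < u → u < T → i < pvOrb limit i u ∧ pvOrb limit i u < limit := by
      intro u hu huT
      rcases not_or.mp (fun hc => hTmin u huT ⟨hu, hc⟩) with ⟨ha, hb⟩
      exact ⟨by omega, by omega⟩
    have hTle : T ≤ ρ := by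
      by_contra h
      exact hTmin ρ (by omega) ⟨hρpos, Or.inr hE⟩
    obtain ⟨T2, hT2a, hT2b, hfst⟩ := pvLoopB_fst_le limit i T hTQ.2 limit.toNat 1
      [pvOrb limit i 0] (pvOrb limit i 0) 1 1 hTQ.1 (by omega)
    have hTne : pvOrb limit i T2 ≠ i := by
      intro h
      rcases Nat.lt_or_ge T2 ρ with hTρ | hTρ
      · exact (hρ2 T2 hTρ).2 (List.mem_map.mpr ⟨0, List.mem_range.mpr (by omega), by
          rw [pvOrb_zero, h]⟩)
      · have hTeq : T2 = ρ := by omega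
        subst hTeq
        rw [h] at hE
        omega
    have hBmc : solveStepB (pySieve limit) limit mc i = mc := by
      refine pvStepB_ne limit i mc ?_
      rw [hfst]
      exact hTne
    refine ⟨by rw [hAmc, hBmc], ?_, by rw [hAmc]⟩
    rw [hAmc]
    intro m h1 h2 hmper hmorb
    rcases lt_or_eq_of_le (by omega : m ≤ i) with hmi | hmi
    · exact hInv m h1 hmi hmper hmorb
    · subst hmi
      exact absurd (show pvOrb limit m ρ < limit from hmorb ρ) (by omega)
  · have hmem : pvOrb limit i ρ ∈ (List.range ρ).map (pvOrb limit i) := hρQ.resolve_left hE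
    obtain ⟨j, hj, hjeq⟩ := List.mem_map.mp hmem
    have hjρ : j < ρ := List.mem_range.mp hj
    by_cases hper : i ∈ Function.periodicPts (pvF limit)
    · -- i sits on a cycle: ρ is its minimal period
      have hdpos : 0 < Function.minimalPeriod (pvF limit) i :=
        Function.minimalPeriod_pos_of_mem_periodicPts hper
      have hiter : pvOrb limit i (Function.minimalPeriod (pvF limit) i) = i :=
        Function.iterate_minimalPeriod
      have hinj := Function.iterate_injOn_Iio_minimalPeriod (f := pvF limit) (x := i)
      have hρd : ρ = Function.minimalPeriod (pvF limit) i := by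
        have hle1 : ρ ≤ Function.minimalPeriod (pvF limit) i := by
          by_contra h
          refine (hρ2 _ (by omega)).2 (List.mem_map.mpr ⟨0, List.mem_range.mpr hdpos, ?_⟩)
          rw [pvOrb_zero, hiter]
        have hle2 : Function.minimalPeriod (pvF limit) i ≤ ρ := by
          by_contra h
          have hj' : j = ρ := hinj (by simp; omega) (by simp; omega) hjeq
          omega
        omega
      have hρi : pvOrb limit i ρ = i := by rw [hρd]; exact hiter
      have hAll : ∀ u, pvOrb limit i u < limit := by
        intro u
        have hmod : pvOrb limit i (u % Function.minimalPeriod (pvF limit) i) =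
            pvOrb limit i u := Function.iterate_mod_minimalPeriod_eq
        rcases Nat.lt_or_ge (u % Function.minimalPeriod (pvF limit) i) ρ with h | h
        · rw [← hmod]
          rcases Nat.eq_zero_or_pos (u % Function.minimalPeriod (pvF limit) i) with h0 | h0
          · rw [h0, pvOrb_zero]; omega
          · exact (hρ2 _ h).1
        · have := Nat.mod_lt u hdpos
          omega
      obtain ⟨T, hTQ, hTmin⟩ := pv_nat_min
        (p := fun u => 0 < u ∧ (pvOrb limit i u ≤ i ∨ limit ≤ pvOrb limit i u))
        ⟨ρ, hρpos, Or.inl (le_of_eq hρi)⟩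
      have hT2 : ∀ u, 0 < u → u < T → i < pvOrb limit i u ∧ pvOrb limit i u < limit := by
        intro u hu huT
        rcases not_or.mp (fun hc => hTmin u huT ⟨hu, hc⟩) with ⟨ha, hb⟩
        exact ⟨by omega, by omega⟩
      have hTle : T ≤ ρ := by
        by_contra h
        exact hTmin ρ (by omega) ⟨hρpos, Or.inl (le_of_eq hρi)⟩
      rcases Nat.lt_or_ge T ρ with hTρ | hTρ
      · -- the cycle dips to m = orb T < i: already accounted for by the invariant at m
        have hTne : pvOrb limit i T ≠ i := by
          intro h
          have h0T : (0:Nat) ∈ Set.Iio (Function.minimalPeriod (pvF limit) i) := by simp; omega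
          have hTT : T ∈ Set.Iio (Function.minimalPeriod (pvF limit) i) := by simp; omega
          have := hinj hTT h0T (show pvOrb limit i T = pvOrb limit i 0 by
            rw [h, pvOrb_zero])
          omega
        have hTlt : pvOrb limit i T < i := by
          rcases hTQ.2 with h | h
          · omega
          · have := hAll T; omega
        have hmpos : 1 ≤ pvOrb limit i T :=
          pvOrb_pos limit i hi hlt T (fun u _ => hAll u)
        have hisper : Function.IsPeriodicPt (pvF limit)
            (Function.minimalPeriod (pvF limit) i) i := hiter
        have hmper : pvOrb limit i T ∈ Function.periodicPts (pvF limit) :=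
          Function.mem_periodicPts.mpr ⟨_, hdpos, hisper.apply_iterate T⟩
        have hmmin : Function.minimalPeriod (pvF limit) (pvOrb limit i T) =
            Function.minimalPeriod (pvF limit) i :=
          Function.minimalPeriod_apply_iterate hper T
        have hmorb : ∀ u : Nat, (pvF limit)^[u] (pvOrb limit i T) < limit := by
          intro u
          have : (pvF limit)^[u] (pvOrb limit i T) = pvOrb limit i (u + T) :=
            (Function.iterate_add_apply _ u T i).symm
          rw [this]
          exact hAll (u + T)
        have hd_le : Function.minimalPeriod (pvF limit) i ≤ mc.length := by
          have := hInv (pvOrb limit i T) hmpos hTlt hmper hmorb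
          rwa [hmmin] at this
        have hAmc : solveStepA (pySieve limit) limit mc i = mc := by
          rw [hA, if_neg (by omega)]
        obtain ⟨T2, hT2a, hT2b, hfst⟩ := pvLoopB_fst_le limit i T hTQ.2 limit.toNat 1
          [pvOrb limit i 0] (pvOrb limit i 0) 1 1 hTQ.1 (by omega)
        have hT2ne : pvOrb limit i T2 ≠ i := by
          intro h
          exact (hρ2 T2 (by omega)).2 (List.mem_map.mpr ⟨0, List.mem_range.mpr (by omega), by
            rw [pvOrb_zero, h]⟩)
        have hBmc : solveStepB (pySieve limit) limit mc i = mc := by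
          refine pvStepB_ne limit i mc ?_
          rw [hfst]
          exact hT2ne
        refine ⟨by rw [hAmc, hBmc], ?_, by rw [hAmc]⟩
        rw [hAmc]
        intro m h1 h2 hmper' hmorb'
        rcases lt_or_eq_of_le (by omega : m ≤ i) with hmi | hmi
        · exact hInv m h1 hmi hmper' hmorb'
        · subst hmi
          exact hd_le
      · -- the walk returns to i itself: both sides see the same candidate cycle
        have hTρ' : T = ρ := by omega
        subst hTρ'
        have hAc : solveStepA (pySieve limit) limit mc i =
            (if T > mc.length then (List.range T).map (pvOrb limit i) else mc) := by
          rw [hA]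
          by_cases hlen : T > mc.length
          · rw [if_pos ⟨hAll T, hρi, hlen⟩, if_pos hlen]
          · rw [if_neg (by tauto), if_neg hlen]
        have hNoRep : ∀ c u : Nat, c < u → u < T → pvOrb limit i u ≠ pvOrb limit i c := by
          intro c u hcu huT h
          have hcmem : c ∈ Set.Iio (Function.minimalPeriod (pvF limit) i) := by simp; omega
          have humem : u ∈ Set.Iio (Function.minimalPeriod (pvF limit) i) := by simp; omega
          have := hinj humem hcmem h
          omega
        have hB := pvLoopB_run limit i T hTQ.2 hT2 hNoRep limit.toNat 1
          (pvOrb limit i 0) 1 1 le_rfl hTQ.1 (by omega) ⟨0, by omega, rfl⟩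
        have hBc : solveStepB (pySieve limit) limit mc i =
            (if T > mc.length then (List.range T).map (pvOrb limit i) else mc) := by
          rw [pvStepB_run limit i mc T hB]
          simp only [hρi, true_and]
        refine ⟨by rw [hAc, hBc], ?_, ?_⟩
        · intro m h1 h2 hmper' hmorb'
          rcases lt_or_eq_of_le (by omega : m ≤ i) with hmi | hmi
          · have := hInv m h1 hmi hmper' hmorb'
            rw [hAc]
            split
            · simpa using by omega
            · exact this
          · subst hmi
            rw [hAc, ← hρd]
            split
            · simp
            · omega
        · rw [hAc]
          split
          · simpa using by omega
          · exact le_rfl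
    · -- i is not periodic: the walk never returns to i, both sides keep mc
      have hρne : pvOrb limit i ρ ≠ i := by
        intro h
        exact hper (Function.mem_periodicPts.mpr ⟨ρ, hρpos, h⟩)
      have hAmc : solveStepA (pySieve limit) limit mc i = mc := by
        rw [hA, if_neg (fun hcon => hρne hcon.2.1)]
      obtain ⟨T, hT1, hfst⟩ := pvLoopB_fst limit i limit.toNat 1 [pvOrb limit i 0]
        (pvOrb limit i 0) 1 1
      have hBmc : solveStepB (pySieve limit) limit mc i = mc := by
        refine pvStepB_ne limit i mc ?_
        rw [hfst]
        intro h
        exact hper (Function.mem_periodicPts.mpr ⟨T, by omega, h⟩)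
      refine ⟨by rw [hAmc, hBmc], ?_, by rw [hAmc]⟩
      rw [hAmc]
      intro m h1 h2 hmper' hmorb'
      rcases lt_or_eq_of_le (by omega : m ≤ i) with hmi | hmi
      · exact hInv m h1 hmi hmper' hmorb'
      · subst hmi
        exact absurd hmper' hper

theorem pv_fold_agree (limit : Int) : ∀ (fuel : Nat) (lo : Int) (mc : List Int), 1 ≤ lo →
    (limit - lo).toNat ≤ fuel → pvInv limit lo mc →
    (PySem.List.pyRange lo limit 1).foldl (solveStepA (pySieve limit) limit) mc =
      (PySem.List.pyRange lo limit 1).foldl (solveStepB (pySieve limit) limit) mc := by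
  intro fuel
  induction fuel with
  | zero =>
    intro lo mc h1 h2 hInv
    rw [PySem.List.pyRange_one_eq_nil (by omega)]
    rfl
  | succ fuel ih =>
    intro lo mc h1 h2 hInv
    by_cases hll : limit ≤ lo
    · rw [PySem.List.pyRange_one_eq_nil (by omega)]
      rfl
    · rw [PySem.List.pyRange_one_cons (by omega)]
      simp only [List.foldl_cons]
      obtain ⟨heq, hInv', _⟩ := pv_step_agree limit lo (by omega) (by omega) mc hInv
      rw [← heq]
      exact ih (lo + 1) _ (by omega) (by omega) hInv'

-- ===== VERDICT (by name: the statement is the Claim_ definition above) =====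
theorem solve_spec : Claim_equal_solve := by
  intro limit _
  unfold Spec_solve solve solve_alt
  exact pv_fold_agree limit (limit - 1).toNat 1 [] le_rfl le_rfl
    (fun m h1 h2 _ _ => absurd (lt_of_le_of_lt h1 h2) (by omega))
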